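-- pv_equiv track=rewrite | github.com/wbz7/wildberries_helper_bot | utils.py | get_text_with_items
-- ===== SOURCE A (Python) =====
-- def get_text_with_items(items):
--     """ Преобразуем товары исходя из информации о них в текстовые сообщения
--         Возвращаем список этих сообщений
--     """
--     items_text = []
--     for item_id, article, item_size, item_name, url, existence, user_price in items:
--         if existence:
--             # размеры могут иметь буквенное обозначение, поэтому поле в БД TEXT
--             # Приходится отсеивать товары без размера, сравнивая со строкой
--             if item_size != '0':
--                 items_text.append(
--                     "*Отслеживание цены:*\n"
--                     f"[{item_name}]({url})\n"
--                     f"Артикул: {article}\n"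
--                     f"Размер: {item_size}\n"
--                     f"Ожидаемая цена: {user_price}\n"
--                     f"*ID* товара: {item_id}\n"
--                 )
--                 continue
--             items_text.append(
--                 "*Отслеживание цены:*\n"
--                 f"[{item_name}]({url})\n"
--                 f"Артикул: {article}\n"
--                 f"Ожидаемая цена: {user_price}\n"
--                 f"*ID* товара: {item_id}\n"
--             )
--             continue
--         # размеры могут иметь буквенное обозначение, поэтому поле в БД TEXT
--         # Приходится отсеивать товары без размера, сравнивая со строкой
--         if item_size != '0':
--             items_text.append(
--                 "*Отслеживание появления:*\n"
--                 f"[{item_name}]({url})\n"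
--                 f"Артикул: {article}\n"
--                 f"Размер: {item_size}\n"
--                 f"*ID* товара: {item_id}\n"
--             )
--             continue
--         items_text.append(
--             "*Отслеживание появления:*\n"
--             f"[{item_name}]({url})\n"
--             f"Артикул: {article}\n"
--             f"*ID* товара: {item_id}\n"
--         )
--         continue
--     return items_text
-- ===== SOURCE B (Python) =====
-- def get_text_with_items(items):
--     """Build each message from conditional parts instead of choosing one of four full templates."""
--     messages = []
--     for item_id, article, item_size, item_name, url, existence, user_price in items:
--         parts = [
--             "*Отслеживание цены:*\n" if existence else "*Отслеживание появления:*\n",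
--             f"[{item_name}]({url})\n",
--             f"Артикул: {article}\n",
--         ]
--         if item_size != '0':
--             parts.append(f"Размер: {item_size}\n")
--         if existence:
--             parts.append(f"Ожидаемая цена: {user_price}\n")
--         parts.append(f"*ID* товара: {item_id}\n")
--         messages.append("".join(parts))
--     return messages
-- ===== Notes on version B (the rewrite author's own statement) =====
-- stated objective: simpler
-- what changed: Replaces A's four-way branch over full message templates by single-pass conditional line assembly: a header chosen by existence, unconditional name/article lines, optional size and expected-price lines, then the ID line, joined per item.
import Mathlib
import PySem

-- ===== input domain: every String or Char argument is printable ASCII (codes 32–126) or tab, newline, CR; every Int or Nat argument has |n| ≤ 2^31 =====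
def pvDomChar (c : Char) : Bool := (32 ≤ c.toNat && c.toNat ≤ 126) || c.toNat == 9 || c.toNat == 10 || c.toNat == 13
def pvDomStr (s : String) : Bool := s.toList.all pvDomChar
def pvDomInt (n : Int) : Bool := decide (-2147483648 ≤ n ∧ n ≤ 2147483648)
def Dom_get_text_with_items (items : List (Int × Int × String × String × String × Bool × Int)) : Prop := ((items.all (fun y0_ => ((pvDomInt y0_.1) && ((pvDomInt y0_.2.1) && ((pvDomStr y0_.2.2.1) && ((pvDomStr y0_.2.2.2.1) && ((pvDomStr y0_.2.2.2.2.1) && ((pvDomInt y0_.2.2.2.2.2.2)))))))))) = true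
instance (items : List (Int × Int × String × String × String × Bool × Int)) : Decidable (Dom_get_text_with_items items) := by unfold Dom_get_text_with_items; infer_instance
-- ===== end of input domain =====

-- B builds each message from conditional parts instead of choosing one of four full templates; same single pass, same output.

-- ===== PORT A =====
-- literal transliteration: four full message templates selected by nested ifs, appended in a loop
-- A's loop body, named so the accumulator lemmas below can speak about it; the code is the literal branch structure
def pvStepA (items_text : List String) (it : Int × Int × String × String × String × Bool × Int) : List String :=
    let (item_id, article, item_size, item_name, url, existence, user_price) := it
    if existence then
      if item_size ≠ "0" then
        items_text ++ ["*Отслеживание цены:*\n" ++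
          "[" ++ item_name ++ "](" ++ url ++ ")\n" ++
          "Артикул: " ++ PySem.Int.toStr article ++ "\n" ++
          "Размер: " ++ item_size ++ "\n" ++
          "Ожидаемая цена: " ++ PySem.Int.toStr user_price ++ "\n" ++
          "*ID* товара: " ++ PySem.Int.toStr item_id ++ "\n"]
      else
        items_text ++ ["*Отслеживание цены:*\n" ++
          "[" ++ item_name ++ "](" ++ url ++ ")\n" ++
          "Артикул: " ++ PySem.Int.toStr article ++ "\n" ++
          "Ожидаемая цена: " ++ PySem.Int.toStr user_price ++ "\n" ++
          "*ID* товара: " ++ PySem.Int.toStr item_id ++ "\n"]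
    else
      if item_size ≠ "0" then
        items_text ++ ["*Отслеживание появления:*\n" ++
          "[" ++ item_name ++ "](" ++ url ++ ")\n" ++
          "Артикул: " ++ PySem.Int.toStr article ++ "\n" ++
          "Размер: " ++ item_size ++ "\n" ++
          "*ID* товара: " ++ PySem.Int.toStr item_id ++ "\n"]
      else
        items_text ++ ["*Отслеживание появления:*\n" ++
          "[" ++ item_name ++ "](" ++ url ++ ")\n" ++
          "Артикул: " ++ PySem.Int.toStr article ++ "\n" ++
          "*ID* товара: " ++ PySem.Int.toStr item_id ++ "\n"]

def get_text_with_items (items : List (Int × Int × String × String × String × Bool × Int)) : List String :=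
  items.foldl pvStepA []

-- ===== PORT B =====
-- literal transliteration of Source B: conditional part list per item, joined with ""
def pvPartsB (it : Int × Int × String × String × String × Bool × Int) : List String :=
  let (item_id, article, item_size, item_name, url, existence, user_price) := it
  (([(if existence then "*Отслеживание цены:*\n" else "*Отслеживание появления:*\n"),
     "[" ++ item_name ++ "](" ++ url ++ ")\n",
     "Артикул: " ++ PySem.Int.toStr article ++ "\n"]
    ++ (if item_size ≠ "0" then ["Размер: " ++ item_size ++ "\n"] else []))
    ++ (if existence then ["Ожидаемая цена: " ++ PySem.Int.toStr user_price ++ "\n"] else []))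
    ++ ["*ID* товара: " ++ PySem.Int.toStr item_id ++ "\n"]

def get_text_with_items_alt (items : List (Int × Int × String × String × String × Bool × Int)) : List String :=
  items.map (fun it => PySem.Str.join "" (pvPartsB it))

-- ===== PRECONDITION & SPEC =====
def Spec_get_text_with_items (items : List (Int × Int × String × String × String × Bool × Int)) (out : List String) : Prop := out = get_text_with_items_alt items
instance (items : List (Int × Int × String × String × String × Bool × Int)) (out : List String) : Decidable (Spec_get_text_with_items items out) := by unfold Spec_get_text_with_items; infer_instance

-- ===== CLAIM (what is proved, stated in full; the proofs are below) =====
def Claim_equal_get_text_with_items : Prop := ∀ (items : List (Int × Int × String × String × String × Bool × Int)), Dom_get_text_with_items items → Spec_get_text_with_items items (get_text_with_items items)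

-- ===== LEMMAS AND PROOFS =====

-- every branch of A's loop body appends one message to the accumulator
theorem pv_step_shift (acc : List String) (it : Int × Int × String × String × String × Bool × Int) :
    pvStepA acc it = acc ++ pvStepA [] it := by
  obtain ⟨item_id, article, item_size, item_name, url, existence, user_price⟩ := it
  by_cases hex : existence = true <;> by_cases hsz : item_size = "0" <;>
    simp [pvStepA, hex, hsz]

-- the single message A's body produces is exactly B's joined part list
theorem pv_item_eq (it : Int × Int × String × String × String × Bool × Int) :
    pvStepA [] it = [PySem.Str.join "" (pvPartsB it)] := by
  obtain ⟨item_id, article, item_size, item_name, url, existence, user_price⟩ := it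
  by_cases hex : existence = true <;> by_cases hsz : item_size = "0" <;>
    (simp [pvStepA, pvPartsB, hex, hsz]
     apply String.toList_injective
     simp [PySem.Str.join, PySem.Chars.join, List.intercalate, String.toList_ofList])

theorem pv_fold_acc (items : List (Int × Int × String × String × String × Bool × Int)) :
    ∀ acc : List String, items.foldl pvStepA acc
      = acc ++ items.map (fun it => PySem.Str.join "" (pvPartsB it)) := by
  induction items with
  | nil => intro acc; simp
  | cons hd tl ih =>
    intro acc
    rw [List.foldl_cons, ih, pv_step_shift, pv_item_eq]
    simp

-- ===== VERDICT (by name: the statement is the Claim_ definition above) =====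
theorem get_text_with_items_spec : Claim_equal_get_text_with_items := by
  intro items _
  unfold Spec_get_text_with_items get_text_with_items_alt get_text_with_items
  rw [pv_fold_acc]
  simp
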